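-- pv_equiv track=rewrite | github.com/SiiLuu/Groundhog | groundhog.py | tempEvolution
-- ===== SOURCE A (Python) =====
-- def tempEvolution(tab):
--     checkEvolution = {}
--     temp = []
--     i = 0
--     while ((i + 1) < len(tab)):
--         if (tab[i] < tab[i + 1]):
--             temp.append('Increasing')
--         else:
--             temp.append('Decreasing')
--         i += 1
--     checkEvolution[temp.count('Increasing')] = False
--     checkEvolution[temp.count('Decreasing')] = True
--     return (checkEvolution[max(checkEvolution)])
-- ===== SOURCE B (Python) =====
-- def tempEvolution(tab):
--     # Net trend balance: +1 for each strictly increasing adjacent pair, -1 otherwise.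
--     # Mostly-decreasing (or tied, or too short) iff the balance is non-positive.
--     return sum(1 if a < b else -1 for a, b in zip(tab, tab[1:])) <= 0
-- ===== Notes on version B (the rewrite author's own statement) =====
-- stated objective: simpler
-- what changed: Replaces A's label-list build, two .count() scans and dict-overwrite/max dispatch by a single signed balance (sum of +1/-1 over adjacent pairs) compared to zero; no labels, no counts, no dict.
import Mathlib
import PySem

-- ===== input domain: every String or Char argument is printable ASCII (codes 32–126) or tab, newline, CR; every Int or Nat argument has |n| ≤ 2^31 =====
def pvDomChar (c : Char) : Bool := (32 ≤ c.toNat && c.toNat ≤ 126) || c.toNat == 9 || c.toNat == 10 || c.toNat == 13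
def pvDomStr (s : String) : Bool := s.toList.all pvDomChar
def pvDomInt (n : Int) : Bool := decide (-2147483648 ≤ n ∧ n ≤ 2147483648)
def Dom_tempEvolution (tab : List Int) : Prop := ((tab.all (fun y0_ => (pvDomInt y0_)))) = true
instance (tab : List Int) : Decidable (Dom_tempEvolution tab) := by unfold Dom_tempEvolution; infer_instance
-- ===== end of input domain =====

-- B replaces A's label-list + two count scans + dict/max dispatch by a single signed balance (+1/-1 per adjacent pair) compared to zero (simpler decomposition).


-- ===== PORT A =====
-- while loop over i with temp.append, then temp.count, dict insertions, max over keys, lookup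
def tempEvolution (tab : List Int) : Bool :=
  let temp : List String :=
    (PySem.List.pyRange 0 ((tab.length : Int) - 1) 1).foldl
      (fun acc i =>
        acc ++ [if PySem.List.pyGetD tab i 0 < PySem.List.pyGetD tab (i + 1) 0
                then "Increasing" else "Decreasing"]) []
  let d : PySem.Dict Int Bool :=
    (PySem.Dict.empty.insert ((PySem.List.count temp "Increasing" : Nat) : Int) false).insert
      ((PySem.List.count temp "Decreasing" : Nat) : Int) true
  match PySem.List.max? d.keys (fun x => x) with
  | some k => d.getD k false
  | none => false

-- ===== PORT B =====
-- sum of +1/-1 over zipped adjacent pairs, compared to zero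
def tempEvolution_alt (tab : List Int) : Bool :=
  decide (((tab.zip tab.tail).foldl
      (fun (s : Int) ab => s + (if ab.1 < ab.2 then 1 else -1)) 0) ≤ 0)

-- ===== PRECONDITION & SPEC =====
def Spec_tempEvolution (tab : List Int) (out : Bool) : Prop := out = tempEvolution_alt tab
instance (tab : List Int) (out : Bool) : Decidable (Spec_tempEvolution tab out) := by unfold Spec_tempEvolution; infer_instance

-- ===== CLAIM (what is proved, stated in full; the proofs are below) =====
def Claim_equal_tempEvolution : Prop := ∀ (tab : List Int), Dom_tempEvolution tab → Spec_tempEvolution tab (tempEvolution tab)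

-- ===== LEMMAS AND PROOFS =====

-- the index loop over range(len(tab)-1) visits exactly the consecutive pairs
lemma pv_range_pairs (g : Int → Int → String) :
    ∀ (tab : List Int),
      (List.range (tab.length - 1)).map
        (fun i => g (tab.getD i 0) (tab.getD (i + 1) 0))
      = (tab.zip tab.tail).map (fun ab => g ab.1 ab.2) := by
  intro tab
  induction tab with
  | nil => simp
  | cons a t ih =>
    cases t with
    | nil => simp
    | cons b r =>
      have h : (a :: b :: r).length - 1 = ((b :: r).length - 1) + 1 := by
        simp [List.length]
      rw [h, List.range_succ_eq_map]
      simpa [List.map_map, Function.comp] using ih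

-- B's balance loop computes (#increasing pairs) - (#other pairs)
lemma pv_fold_balance (l : List (Int × Int)) (s : Int) :
    l.foldl (fun (s : Int) ab => s + (if ab.1 < ab.2 then 1 else -1)) s
    = s + (l.countP (fun ab => decide (ab.1 < ab.2)) : Int)
        - (l.countP (fun ab => ! decide (ab.1 < ab.2)) : Int) := by
  induction l generalizing s with
  | nil => simp
  | cons x xs ih =>
    by_cases h : x.1 < x.2 <;>
      simp [h, ih] <;> ring

-- temp's build loop, as a map over the pairs
lemma pv_temp_counts (tab : List Int) :
    (PySem.List.pyRange 0 ((tab.length : Int) - 1) 1).foldl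
      (fun acc i =>
        acc ++ [if PySem.List.pyGetD tab i 0 < PySem.List.pyGetD tab (i + 1) 0
                then "Increasing" else "Decreasing"]) []
    = (tab.zip tab.tail).map
        (fun ab => if ab.1 < ab.2 then "Increasing" else "Decreasing") := by
  rw [PySem.List.foldl_append_singleton_eq_map]
  cases tab with
  | nil => simp [PySem.List.pyRange]
  | cons a t =>
    have h1 : ((a :: t).length : Int) - 1 = ((a :: t).length - 1 : Nat) := by
      simp [List.length_cons]
    rw [h1, PySem.List.pyRange_zero_natCast]
    rw [List.map_map]
    rw [← pv_range_pairs (fun x y => if x < y then "Increasing" else "Decreasing") (a :: t)]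
    apply List.map_congr_left
    intro i _
    have h2 : ((i : Int) + 1) = ((i + 1 : Nat) : Int) := by push_cast; ring
    simp only [Function.comp_apply]
    rw [PySem.List.pyGetD_natCast, h2, PySem.List.pyGetD_natCast]

-- A's dict/max dispatch is the comparison i ≤ d
lemma pv_dict_verdict (i d : Int) :
    (match PySem.List.max? ((PySem.Dict.empty.insert i false).insert d true).keys (fun x => x) with
     | some k => ((PySem.Dict.empty.insert i false).insert d true).getD k false
     | none => false) = decide (i ≤ d) := by
  by_cases h : i = d
  · subst h
    simp [PySem.Dict.insert, PySem.Dict.empty, PySem.Dict.getD, PySem.Dict.get?,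
          PySem.List.max?, PySem.Dict.keys]
  · have hins : (PySem.Dict.empty.insert i false).insert d true
        = PySem.Dict.mk [(i, false), (d, true)] := by
      simp [PySem.Dict.insert, PySem.Dict.empty, PySem.Dict.contains, h]
    rw [hins]
    have hmax : PySem.List.max? (PySem.Dict.mk [(i, false), (d, true)]).keys (fun x => x)
        = some (max i d) := by
      simp [PySem.Dict.keys_mk, PySem.List.max?_id_cons]
    rw [hmax]
    by_cases hle : i ≤ d
    · have hm : max i d = d := max_eq_right hle
      simp [PySem.Dict.getD, PySem.Dict.get?_mk_cons, hle, h]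
    · have hm : max i d = i := max_eq_left (le_of_not_ge hle)
      simp [hm, PySem.Dict.getD, PySem.Dict.get?_mk_cons, hle]

-- counting a label in the mapped pair list is countP on the pairs
lemma pv_count_inc (l : List (Int × Int)) :
    PySem.List.count (l.map (fun ab => if ab.1 < ab.2 then "Increasing" else "Decreasing")) "Increasing"
      = l.countP (fun ab => decide (ab.1 < ab.2)) := by
  induction l with
  | nil => simp [PySem.List.count]
  | cons x xs ih =>
    by_cases hx : x.1 < x.2 <;>
      simp [PySem.List.count, hx] <;>
      simpa [PySem.List.count] using ih

lemma pv_count_dec (l : List (Int × Int)) :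
    PySem.List.count (l.map (fun ab => if ab.1 < ab.2 then "Increasing" else "Decreasing")) "Decreasing"
      = l.countP (fun ab => ! decide (ab.1 < ab.2)) := by
  induction l with
  | nil => simp [PySem.List.count]
  | cons x xs ih =>
    by_cases hx : x.1 < x.2 <;>
      simp [PySem.List.count, hx] <;>
      simpa [PySem.List.count] using ih

-- ===== VERDICT (by name: the statement is the Claim_ definition above) =====
theorem tempEvolution_spec : Claim_equal_tempEvolution := by
  intro tab _
  unfold Spec_tempEvolution tempEvolution tempEvolution_alt
  simp only [pv_temp_counts, pv_fold_balance, pv_count_inc, pv_count_dec, zero_add,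
    pv_dict_verdict]
  simp
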